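-- pv_equiv track=rewrite | github.com/jacobianjl/binarysearch-solutions | kprefix.py | solve
-- ===== SOURCE A (Python) =====
-- def solve(nums, k):
--     if not nums:
--         return -1
--     sums = sum(nums)
--     for i in range(0, len(nums)):
--         if sums > k:
--             sums -= nums[len(nums) - 1 - i]
--         else:
--             return len(nums) - 1 - i
--     return -1
-- ===== SOURCE B (Python) =====
-- def solve(nums, k):
--     if not nums:
--         return -1
--     running = 0
--     best = 0
--     for l, x in enumerate(nums, 1):
--         running += x
--         if running <= k:
--             best = l
--     return best - 1
-- ===== Notes on version B (the rewrite author's own statement) =====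
-- stated objective: simpler
-- what changed: B replaces A's total-minus-suffix backward scan with early return by a single forward prefix-sum accumulator that remembers the best prefix length and returns best-1 after the loop.
import Mathlib
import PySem

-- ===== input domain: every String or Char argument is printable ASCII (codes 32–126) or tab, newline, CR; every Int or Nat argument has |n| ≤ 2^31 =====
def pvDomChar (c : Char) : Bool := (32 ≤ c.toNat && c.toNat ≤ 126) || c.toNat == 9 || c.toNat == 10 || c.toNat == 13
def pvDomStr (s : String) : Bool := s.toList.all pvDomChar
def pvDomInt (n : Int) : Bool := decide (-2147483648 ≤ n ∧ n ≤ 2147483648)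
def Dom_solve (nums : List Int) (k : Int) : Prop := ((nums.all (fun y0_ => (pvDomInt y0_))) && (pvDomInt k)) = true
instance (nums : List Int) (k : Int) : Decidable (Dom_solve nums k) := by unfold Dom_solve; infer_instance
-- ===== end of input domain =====

-- ===== PORT A =====
-- Loop of A: i runs over range(0, len(nums)); nums[len(nums)-1-i] is always in range here,
-- so getD is exact for that indexing.
def solveLoop (nums : List Int) (k : Int) (sums : Int) (i : Nat) : Int :=
  if _h : i < nums.length then
    if sums > k then
      solveLoop nums k (sums - nums.getD (nums.length - 1 - i) 0) (i + 1)
    else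
      (nums.length : Int) - 1 - (i : Int)
  else
    -1
termination_by nums.length - i

def solve (nums : List Int) (k : Int) : Int :=
  if nums = [] then -1
  else solveLoop nums k nums.sum 0

-- ===== PORT B =====
-- B: one forward pass; state = (running, best, l), l the 1-based position.
def solve_alt (nums : List Int) (k : Int) : Int :=
  if nums = [] then -1
  else
    let st := nums.foldl
      (fun (s : Int × Int × Int) x =>
        let running := s.1 + x
        let l := s.2.2 + 1
        let best := if running ≤ k then l else s.2.1
        (running, best, l)) (0, 0, 0)
    st.2.1 - 1

-- ===== PRECONDITION & SPEC =====
def Spec_solve (nums : List Int) (k : Int) (out : Int) : Prop := out = solve_alt nums k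
instance (nums : List Int) (k : Int) (out : Int) : Decidable (Spec_solve nums k out) := by unfold Spec_solve; infer_instance

-- ===== CLAIM (what is proved, stated in full; the proofs are below) =====
def Claim_equal_solve : Prop := ∀ (nums : List Int) (k : Int), Dom_solve nums k → Spec_solve nums k (solve nums k)

-- ===== LEMMAS AND PROOFS =====

-- greatest prefix length L (1-based) with prefix sum ≤ k, 0 if none
def gBest (k : Int) (xs : List Int) : Nat :=
  if _h : xs = [] then 0
  else if xs.sum ≤ k then xs.length
  else gBest k xs.dropLast
termination_by xs.length
decreasing_by
  simp only [List.length_dropLast]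
  have : xs.length ≠ 0 := by simpa [List.length_eq_zero_iff] using _h
  omega

theorem gBest_nil (k : Int) : gBest k [] = 0 := by simp [gBest]

theorem gBest_snoc (k : Int) (xs : List Int) (x : Int) :
    gBest k (xs ++ [x]) = if xs.sum + x ≤ k then xs.length + 1 else gBest k xs := by
  rw [gBest]
  simp

theorem foldB (k : Int) (xs : List Int) :
    xs.foldl
      (fun (s : Int × Int × Int) x =>
        let running := s.1 + x
        let l := s.2.2 + 1
        let best := if running ≤ k then l else s.2.1
        (running, best, l)) (0, 0, 0)
      = (xs.sum, ((gBest k xs : Nat) : Int), (xs.length : Int)) := by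
  induction xs using List.reverseRecOn with
  | nil => simp [gBest_nil]
  | append_singleton xs x ih =>
      rw [List.foldl_append, ih, gBest_snoc]
      by_cases h : xs.sum + x ≤ k <;> simp [h]

theorem loopA (nums : List Int) (k : Int) :
    ∀ j : Nat, j ≤ nums.length →
      solveLoop nums k ((nums.take j).sum) (nums.length - j)
        = ((gBest k (nums.take j) : Nat) : Int) - 1 := by
  intro j
  induction j with
  | zero =>
      intro _
      rw [solveLoop]
      simp [gBest_nil]
  | succ j ih =>
      intro hj
      have hj' : j < nums.length := by omega
      have htake : nums.take (j + 1) = nums.take j ++ [nums[j]] := by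
        rw [List.take_add_one]
        simp [List.getElem?_eq_getElem hj']
      rw [solveLoop]
      have hlt : nums.length - (j + 1) < nums.length := by omega
      rw [dif_pos hlt]
      by_cases hk : (nums.take (j + 1)).sum > k
      · rw [if_pos hk]
        have hidx : nums.length - 1 - (nums.length - (j + 1)) = j := by omega
        have hget : nums.getD (nums.length - 1 - (nums.length - (j + 1))) 0 = nums[j] := by
          rw [hidx]; simp [List.getD_eq_getElem?_getD, List.getElem?_eq_getElem hj']
        have hsum : (nums.take (j + 1)).sum - nums[j] = (nums.take j).sum := by
          rw [htake]; simp only [List.sum_append, List.sum_cons, List.sum_nil]; ring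
        have hi : nums.length - (j + 1) + 1 = nums.length - j := by omega
        rw [hget, hsum, hi, ih (by omega)]
        rw [htake, gBest_snoc]
        have : ¬ (nums.take j).sum + nums[j] ≤ k := by
          have h2 := hk; rw [htake] at h2
          simp only [List.sum_append, List.sum_cons, List.sum_nil, add_zero] at h2; omega
        rw [if_neg this]
      · rw [if_neg hk]
        have hg : gBest k (nums.take (j + 1)) = j + 1 := by
          rw [htake, gBest_snoc]
          have : (nums.take j).sum + nums[j] ≤ k := by
            have h2 : (nums.take (j+1)).sum ≤ k := by omega
            rw [htake] at h2
            simp only [List.sum_append, List.sum_cons, List.sum_nil, add_zero] at h2; exact h2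
          rw [if_pos this]
          have : (nums.take j).length = j := List.length_take_of_le (le_of_lt hj')
          omega
        rw [hg]
        have : ((nums.length - (j + 1) : Nat) : Int) = (nums.length : Int) - (j + 1) := by
          omega
        rw [this]
        push_cast
        ring

theorem solve_eq_alt (nums : List Int) (k : Int) : solve nums k = solve_alt nums k := by
  unfold solve solve_alt
  by_cases h : nums = []
  · simp [h]
  · rw [if_neg h, if_neg h]
    have := loopA nums k nums.length (le_refl _)
    simp only [Nat.sub_self, List.take_length] at this
    rw [this, foldB]

-- ===== VERDICT (by name: the statement is the Claim_ definition above) =====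
theorem solve_spec : Claim_equal_solve := by
  intro nums k _
  unfold Spec_solve
  exact solve_eq_alt nums k
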